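-- pv_equiv track=rewrite | github.com/JohannSeverin/HamiltonianLearning | old/hamiltonian_learning_utils.py | pauli_strings
-- ===== SOURCE A (Python) =====
-- from itertools import product
-- from itertools import product
--
-- def pauli_strings(
--     number_of_qubits=1,
--     include_identity=True,
-- ):
--     pauli_letters = "ixyz" if include_identity else "xyz"
--     return [
--         "".join(indices) for indices in product(pauli_letters, repeat=number_of_qubits)
--     ]
-- ===== SOURCE B (Python) =====
-- def pauli_strings(
--     number_of_qubits=1,
--     include_identity=True,
-- ):
--     letters = "ixyz" if include_identity else "xyz"
--
--     def build(n):
--         if n == 0: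
--             return [""]
--         if n == 1:
--             return list(letters)
--         half = n // 2
--         left = build(half)
--         right = build(n - half)
--         return [a + b for a in left for b in right]
--
--     return build(number_of_qubits)
-- ===== Notes on version B (the rewrite author's own statement) =====
-- stated objective: alternative
-- what changed: B builds the strings by divide and conquer: it recursively computes the lists for n//2 and n-n//2 qubits and concatenates every left half with every right half, instead of one itertools.product pass joining n single letters per string.
import Mathlib
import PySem

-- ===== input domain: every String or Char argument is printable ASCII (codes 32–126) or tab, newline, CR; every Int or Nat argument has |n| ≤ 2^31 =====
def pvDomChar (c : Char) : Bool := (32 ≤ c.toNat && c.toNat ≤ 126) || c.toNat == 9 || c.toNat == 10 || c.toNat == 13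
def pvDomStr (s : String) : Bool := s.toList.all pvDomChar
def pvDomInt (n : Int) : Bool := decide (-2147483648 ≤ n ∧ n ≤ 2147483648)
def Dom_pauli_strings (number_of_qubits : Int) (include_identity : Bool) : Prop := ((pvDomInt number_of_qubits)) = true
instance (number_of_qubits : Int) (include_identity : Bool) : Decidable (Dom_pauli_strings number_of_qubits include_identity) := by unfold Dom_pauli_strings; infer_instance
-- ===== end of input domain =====

-- B builds the strings by divide and conquer (cross-concatenating the lists for n//2 and
-- n-n//2 qubits) instead of expanding a Cartesian product (objective: alternative).

-- ===== PORT A =====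
-- Port of itertools.product(letters, repeat=k): first position varies slowest.
def pvProd (letters : List Char) : Nat → List (List Char)
  | 0 => [[]]
  | k + 1 => letters.flatMap (fun c => (pvProd letters k).map (fun t => c :: t))

def pauli_strings (number_of_qubits : Int) (include_identity : Bool) : List String :=
  let pauli_letters : String := if include_identity then "ixyz" else "xyz"
  (pvProd pauli_letters.toList number_of_qubits.toNat).map (fun t => String.ofList t)

-- ===== PORT B =====
-- divide-and-conquer build(n) of Source B: split n into half and n-half, cross-concatenate
def pvBuild (letters : List Char) : Nat → List String
  | 0 => [""]
  | 1 => letters.map (fun c => String.singleton c)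
  | n + 2 =>
    let half := (n + 2) / 2
    let left := pvBuild letters half
    let right := pvBuild letters ((n + 2) - half)
    left.flatMap (fun a => right.map (fun b => a ++ b))
decreasing_by all_goals omega

def pauli_strings_alt (number_of_qubits : Int) (include_identity : Bool) : List String :=
  let letters : String := if include_identity then "ixyz" else "xyz"
  pvBuild letters.toList number_of_qubits.toNat

-- ===== PRECONDITION & SPEC =====
-- Pre_ excludes negative qubit counts, on which A raises ValueError (product's repeat
-- argument cannot be negative; B's recursion also fails to return there).
def Pre_pauli_strings (number_of_qubits : Int) (include_identity : Bool) : Prop :=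
  0 ≤ number_of_qubits
instance (number_of_qubits : Int) (include_identity : Bool) : Decidable (Pre_pauli_strings number_of_qubits include_identity) := by unfold Pre_pauli_strings; infer_instance
def pvWitness_pauli_strings : Int × Bool := (2, true)

def Spec_pauli_strings (number_of_qubits : Int) (include_identity : Bool) (out : List String) : Prop := out = pauli_strings_alt number_of_qubits include_identity
instance (number_of_qubits : Int) (include_identity : Bool) (out : List String) : Decidable (Spec_pauli_strings number_of_qubits include_identity out) := by unfold Spec_pauli_strings; infer_instance

-- ===== CLAIM (what is proved, stated in full; the proofs are below) =====
def Claim_equal_pauli_strings : Prop := ∀ (number_of_qubits : Int) (include_identity : Bool), Dom_pauli_strings number_of_qubits include_identity → Pre_pauli_strings number_of_qubits include_identity → Spec_pauli_strings number_of_qubits include_identity (pauli_strings number_of_qubits include_identity)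

-- ===== LEMMAS AND PROOFS =====
-- appending one character at the end of every tuple (used to relate the two pvProd splits)
theorem pvProd_add (letters : List Char) (a b : Nat) :
    pvProd letters (a + b)
      = (pvProd letters a).flatMap (fun s => (pvProd letters b).map (fun t => s ++ t)) := by
  induction a with
  | zero => simp [pvProd]
  | succ a ih =>
    have : a + 1 + b = (a + b) + 1 := by omega
    rw [this, pvProd, pvProd, ih, List.flatMap_assoc]
    refine List.flatMap_congr ?_
    intro c _
    simp [List.flatMap_map, List.map_flatMap, List.map_map, Function.comp_def]

theorem singleton_eq_ofList (c : Char) : String.singleton c = String.ofList [c] := by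
  apply String.toList_inj.mp
  simp [String.singleton]

theorem map_singleton_flatMap (l : List Char) :
    l.map (fun c => String.singleton c)
      = (l.flatMap (fun c => [[c]])).map (fun t => String.ofList t) := by
  induction l with
  | nil => rfl
  | cons c l ih =>
    simp only [List.map_cons, List.flatMap_cons, List.singleton_append]
    rw [ih, singleton_eq_ofList]

theorem ofList_append (s t : List Char) :
    String.ofList s ++ String.ofList t = String.ofList (s ++ t) := by
  apply String.toList_inj.mp
  simp

theorem pvBuild_eq_prod (letters : List Char) (n : Nat) :
    pvBuild letters n = (pvProd letters n).map (fun t => String.ofList t) := by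
  induction n using Nat.strong_induction_on with
  | _ n ih =>
    match n with
    | 0 => simp [pvBuild, pvProd]
    | 1 =>
      rw [pvBuild]
      simp only [pvProd, List.map_cons, List.map_nil]
      exact map_singleton_flatMap letters
    | m + 2 =>
      rw [pvBuild]
      have h1 : (m + 2) / 2 < m + 2 := by omega
      have h2 : (m + 2) - (m + 2) / 2 < m + 2 := by omega
      rw [ih _ h1, ih _ h2]
      have hsplit : (m + 2) / 2 + ((m + 2) - (m + 2) / 2) = m + 2 := by omega
      conv_rhs => rw [← hsplit]
      rw [pvProd_add]
      simp only [List.map_flatMap, List.flatMap_map, List.map_map, Function.comp]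
      refine List.flatMap_congr ?_
      intro s _
      refine List.map_congr_left ?_
      intro t _
      exact ofList_append s t

-- ===== VERDICT (by name: the statement is the Claim_ definition above) =====
theorem pauli_strings_spec : Claim_equal_pauli_strings := by
  intro n b _ _
  unfold Spec_pauli_strings
  dsimp only [pauli_strings, pauli_strings_alt]
  rw [pvBuild_eq_prod]
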